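-- pv_equiv track=rewrite | github.com/dangerous3/stepik-python-basics-and-usage | m2.1-errors_and_exceptions/exceptions_modelling.py | dfs
-- ===== SOURCE A (Python) =====
-- def dfs(graph, start):
--     visited, stack = set(), [start]
--     while stack:
--         vertex = stack.pop()
--         if vertex not in visited:
--             visited.add(vertex)
--             stack.extend(graph[vertex]['ancestors'] - visited)
--     return visited  # возвращает список из элемента и его предков
-- ===== SOURCE B (Python) =====
-- def dfs(graph, start):
--     # Functional recursive DFS: a pure helper threads the visited set through
--     # the recursion (call stack instead of A's explicit worklist stack); the
--     # returned set of reachable vertices is identical.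
--     def visit(visited, v):
--         if v in visited:
--             return visited
--         visited = visited | {v}
--         for a in graph[v]['ancestors']:
--             visited = visit(visited, a)
--         return visited
--
--     return visit(set(), start)
-- ===== Notes on version B (the rewrite author's own statement) =====
-- stated objective: idiomatic
-- what changed: Replaced the explicit worklist stack (pop + push of the set-difference of ancestors) with a pure recursive DFS helper that threads the visited set through the recursion and recurses over each ancestor on the call stack.
import Mathlib
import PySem

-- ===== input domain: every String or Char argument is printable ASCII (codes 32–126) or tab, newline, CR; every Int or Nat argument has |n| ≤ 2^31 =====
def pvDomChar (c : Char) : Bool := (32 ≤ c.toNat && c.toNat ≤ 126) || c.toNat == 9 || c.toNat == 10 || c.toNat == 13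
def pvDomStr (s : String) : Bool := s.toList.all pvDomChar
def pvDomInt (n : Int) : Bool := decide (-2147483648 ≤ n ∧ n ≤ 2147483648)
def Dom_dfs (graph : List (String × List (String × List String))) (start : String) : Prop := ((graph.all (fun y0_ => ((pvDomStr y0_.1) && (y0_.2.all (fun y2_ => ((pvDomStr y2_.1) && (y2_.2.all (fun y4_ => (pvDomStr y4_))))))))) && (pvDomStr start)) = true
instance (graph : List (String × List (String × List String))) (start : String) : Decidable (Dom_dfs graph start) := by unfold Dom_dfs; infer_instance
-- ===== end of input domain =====

-- B changes only the decomposition: a pure recursive DFS threading the visited set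
-- (call stack) instead of A's explicit stack loop; the same reachable set is returned.

-- ===== PORT A =====
-- A-side helpers: first-match dict lookup (Python d[k]) and the vertex's ancestor set.
-- Outside Pre_dfs a lookup can fail (Python raises KeyError there); the port then uses
-- the empty ancestor set — Pre_dfs excludes exactly those inputs.
def pvLookup {α : Type} (l : List (String × α)) (k : String) : Option α :=
  (l.find? (fun p => p.1 == k)).map Prod.snd

def pvAnc (graph : List (String × List (String × List String))) (v : String) : List String :=
  match pvLookup graph v with
  | some d => (pvLookup d "ancestors").getD []
  | none => []

-- Termination measure for A's loop: number of graph keys not yet visited.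
def pvUnvis (graph : List (String × List (String × List String))) (vis : List String) : Nat :=
  ((graph.map Prod.fst).filter (fun k => !(PySem.Set.contains vis k))).length

theorem pvFilterLen_le {α : Type} (l : List α) (p q : α → Bool)
    (h : ∀ a, p a = true → q a = true) : (l.filter p).length ≤ (l.filter q).length := by
  induction l with
  | nil => simp
  | cons x t ih =>
    by_cases hx : p x = true
    · simp [hx, h x hx]; omega
    · have hx' : p x = false := by simp at hx; exact hx
      by_cases hq : q x = true <;> simp [hx', hq] <;> omega

theorem pvFilterLen_lt {α : Type} (l : List α) (p q : α → Bool)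
    (h : ∀ a, p a = true → q a = true) (x : α) (hx : x ∈ l) (hqx : q x = true)
    (hpx : p x = false) : (l.filter p).length < (l.filter q).length := by
  induction l with
  | nil => cases hx
  | cons y t ih =>
    rcases List.mem_cons.mp hx with rfl | hmem
    · have h1 := pvFilterLen_le t p q h
      simp [hpx, hqx]; omega
    · by_cases hy : p y = true
      · simp [hy, h y hy]; exact ih hmem
      · have hy' : p y = false := by simp at hy; exact hy
        have := ih hmem
        by_cases hqy : q y = true <;> simp [hy', hqy] <;> omega

theorem pvUnvis_add_lt (graph : List (String × List (String × List String)))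
    (vis : List String) (v : String) (hk : v ∈ graph.map Prod.fst)
    (hv : PySem.Set.contains vis v = false) :
    pvUnvis graph (PySem.Set.add vis v) < pvUnvis graph vis := by
  apply pvFilterLen_lt _ _ _ (by
      intro a ha
      simp only [Bool.not_eq_true'] at ha ⊢
      cases h : PySem.Set.contains vis a
      · rfl
      · exfalso
        have hm : a ∈ vis := (PySem.Set.contains_iff _ _).mp h
        have : a ∈ PySem.Set.add vis v := (PySem.Set.mem_add _ _ _).mpr (Or.inl hm)
        rw [(PySem.Set.contains_iff _ _).mpr this] at ha
        cases ha) v hk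
  · show (!PySem.Set.contains vis v) = true
    rw [hv]
    rfl
  · simp only [Bool.not_eq_false']
    exact (PySem.Set.contains_iff _ _).mpr ((PySem.Set.mem_add _ _ _).mpr (Or.inr rfl))

theorem pvUnvis_add_eq (graph : List (String × List (String × List String)))
    (vis : List String) (v : String) (hk : v ∉ graph.map Prod.fst) :
    pvUnvis graph (PySem.Set.add vis v) = pvUnvis graph vis := by
  unfold pvUnvis
  congr 1
  apply List.filter_congr
  intro a ha
  have hav : a ≠ v := fun h => hk (h ▸ ha)
  congr 1
  by_cases hm : a ∈ vis
  · rw [(PySem.Set.contains_iff _ _).mpr hm,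
      (PySem.Set.contains_iff _ _).mpr ((PySem.Set.mem_add _ _ _).mpr (Or.inl hm))]
  · have h1 : a ∉ PySem.Set.add vis v := by
      intro hc
      rcases (PySem.Set.mem_add _ _ _).mp hc with h | h
      · exact hm h
      · exact hav h
    cases hc : PySem.Set.contains (PySem.Set.add vis v) a
    · cases hc2 : PySem.Set.contains vis a
      · rfl
      · exact absurd ((PySem.Set.contains_iff _ _).mp hc2) hm
    · exact absurd ((PySem.Set.contains_iff _ _).mp hc) h1

theorem pvAnc_of_not_key (graph : List (String × List (String × List String)))
    (v : String) (hk : v ∉ graph.map Prod.fst) : pvAnc graph v = [] := by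
  have h0 : List.find? (fun p => p.1 == v) graph = none := by
    apply List.find?_eq_none.mpr
    intro p hp
    simp only [beq_iff_eq]
    intro h
    exact hk (h ▸ List.mem_map_of_mem hp)
  simp [pvAnc, pvLookup, h0]

-- Literal port of A: visited set + explicit stack; pop from the end, push the
-- set-difference of the popped vertex's ancestors with visited.
def dfsLoopA (graph : List (String × List (String × List String)))
    (visited : PySem.Set String) (stack : List String) : List String :=
  match stack with
  | [] => visited
  | a :: as =>
    let vertex := (a :: as).getLast (List.cons_ne_nil a as)   -- vertex = stack.pop()
    let stack' := (a :: as).dropLast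
    if h : PySem.Set.contains visited vertex = false then     -- if vertex not in visited
      let visited' := PySem.Set.add visited vertex            -- visited.add(vertex)
      dfsLoopA graph visited' (stack' ++ PySem.Set.diff (pvAnc graph vertex) visited')
        -- stack.extend(graph[vertex]['ancestors'] - visited)
    else
      dfsLoopA graph visited stack'
termination_by (pvUnvis graph visited, stack.length)
decreasing_by
  · by_cases hk : (a :: as).getLast (List.cons_ne_nil a as) ∈ graph.map Prod.fst
    · exact Prod.Lex.left _ _ (pvUnvis_add_lt graph visited _ hk h)
    · rw [pvAnc_of_not_key graph _ hk, pvUnvis_add_eq graph visited _ hk]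
      apply Prod.Lex.right
      simp [PySem.Set.diff]
  · apply Prod.Lex.right
    simp

def dfs (graph : List (String × List (String × List String))) (start : String) : List String :=
  dfsLoopA graph PySem.Set.empty [start]

-- ===== PORT B =====
-- B-side helpers: B's own first-match lookup (Python d[k], written as explicit
-- recursion) and graph[v]['ancestors'] (empty list where Python would raise KeyError;
-- Pre_dfs excludes exactly those inputs).
def lookB {α : Type} : List (String × α) → String → Option α
  | [], _ => none
  | (k, x) :: t, q => if k == q then some x else lookB t q

def ancB (graph : List (String × List (String × List String))) (v : String) : List String :=
  match lookB graph v with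
  | some d => (lookB d "ancestors").getD []
  | none => []

-- Port of B's recursive helper visit(visited, v). The recursion is structural on a
-- fuel counter, a totality guard only: dfs_alt supplies graph.length + 1 fuel, which
-- is proved sufficient below (the 0-fuel branch is never reached there), so the port
-- computes exactly what B's recursion computes. The for-loop over the ancestor set is
-- the fold over its element list (Python's set iteration order is unspecified; this
-- port fixes reversed representation order — the resulting SET does not depend on it).
def visitB (graph : List (String × List (String × List String))) :
    Nat → PySem.Set String → String → PySem.Set String
  | 0, visited, _ => visited
  | fuel + 1, visited, v =>
    if PySem.Set.contains visited v then visited          -- if v in visited: return visited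
    else                                                  -- visited = visited | {v}
      ((ancB graph v).reverse).foldl (visitB graph fuel)  -- for a in ancestors: visited = visit(visited, a)
        (PySem.Set.add visited v)

def dfs_alt (graph : List (String × List (String × List String))) (start : String) : List String :=
  visitB graph (graph.length + 1) PySem.Set.empty start   -- return visit(set(), start)

-- ===== PRECONDITION & SPEC =====
-- Reachability closure: iterate one ancestor-expansion step |graph|+1 times from {start}
-- (stabilises, since every intermediate vertex on a path is a key). Used only by Pre_dfs.
def pvReach (graph : List (String × List (String × List String))) (start : String) : List String :=
  (List.range (graph.length + 1)).foldl
    (fun R _ => PySem.Set.update R (R.flatMap (pvAnc graph)))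
    (PySem.Set.ofList [start])

-- Pre_dfs: every vertex reachable from start via ancestor edges has a graph entry carrying
-- an 'ancestors' field — exactly the inputs on which Python A returns normally; on the
-- others A raises KeyError.
def Pre_dfs (graph : List (String × List (String × List String))) (start : String) : Prop :=
  ∀ v ∈ pvReach graph start,
    ((pvLookup graph v).bind (fun d => pvLookup d "ancestors")).isSome = true
instance (graph : List (String × List (String × List String))) (start : String) : Decidable (Pre_dfs graph start) := by unfold Pre_dfs; infer_instance
def pvWitness_dfs : (List (String × List (String × List String))) × String :=
  ([("a", [("ancestors", ["b"])]), ("b", [("ancestors", [])])], "a")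

def Spec_dfs (graph : List (String × List (String × List String))) (start : String) (out : List String) : Prop := out = dfs_alt graph start
instance (graph : List (String × List (String × List String))) (start : String) (out : List String) : Decidable (Spec_dfs graph start out) := by unfold Spec_dfs; infer_instance

-- ===== CLAIM (what is proved, stated in full; the proofs are below) =====
def Claim_equal_dfs : Prop := ∀ (graph : List (String × List (String × List String))) (start : String), Dom_dfs graph start → Pre_dfs graph start → Spec_dfs graph start (dfs graph start)

-- ===== LEMMAS AND PROOFS =====

theorem pvUnvis_add_le (graph : List (String × List (String × List String)))
    (vis : List String) (v : String) :
    pvUnvis graph (PySem.Set.add vis v) ≤ pvUnvis graph vis := by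
  apply pvFilterLen_le
  intro a ha
  simp only [Bool.not_eq_true'] at ha ⊢
  cases h : PySem.Set.contains vis a
  · rfl
  · exfalso
    have hm : a ∈ vis := (PySem.Set.contains_iff _ _).mp h
    have : a ∈ PySem.Set.add vis v := (PySem.Set.mem_add _ _ _).mpr (Or.inl hm)
    rw [(PySem.Set.contains_iff _ _).mpr this] at ha
    cases ha


theorem pvContains_false_not_mem (vis : List String) (v : String)
    (hv : PySem.Set.contains vis v = false) : v ∉ vis := by
  intro hm
  rw [(PySem.Set.contains_iff _ _).mpr hm] at hv
  cases hv

theorem lookB_eq_pvLookup {α : Type} (l : List (String × α)) (k : String) :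
    lookB l k = pvLookup l k := by
  induction l with
  | nil => rfl
  | cons p t ih =>
    rcases p with ⟨a, x⟩
    by_cases h : a == k
    · simp [lookB, pvLookup, List.find?, h]
    · have h' : (a == k) = false := by simp_all
      simp [lookB, pvLookup, List.find?, h', ih, pvLookup]

theorem ancB_eq_pvAnc (graph : List (String × List (String × List String))) (v : String) :
    ancB graph v = pvAnc graph v := by
  rw [ancB, pvAnc, lookB_eq_pvLookup]
  cases pvLookup graph v with
  | none => rfl
  | some d => simp only [lookB_eq_pvLookup]

-- Canonical sequential DFS, shared reference point for both ports (proof-only).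
-- The subtype result carries the invariant needed for termination of the nested call.
def dfsGo (graph : List (String × List (String × List String)))
    (visited : PySem.Set String) (pending : List String) :
    {s : PySem.Set String // pvUnvis graph s ≤ pvUnvis graph visited} :=
  match pending with
  | [] => ⟨visited, Nat.le_refl _⟩
  | v :: rest =>
    if h : PySem.Set.contains visited v = false then
      let visited' := PySem.Set.add visited v
      let r1 := dfsGo graph visited' (pvAnc graph v).reverse
      let r2 := dfsGo graph r1.val rest
      ⟨r2.val, Nat.le_trans r2.property (Nat.le_trans r1.property (pvUnvis_add_le graph visited v))⟩
    else
      let r := dfsGo graph visited rest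
      ⟨r.val, r.property⟩
termination_by (pvUnvis graph visited, pending.length)
decreasing_by
  · by_cases hk : v ∈ graph.map Prod.fst
    · exact Prod.Lex.left _ _ (pvUnvis_add_lt graph visited _ hk h)
    · rw [pvAnc_of_not_key graph _ hk, pvUnvis_add_eq graph visited _ hk]
      apply Prod.Lex.right
      simp
  · have h1 : pvUnvis graph r1.val ≤ pvUnvis graph visited :=
      Nat.le_trans r1.property (pvUnvis_add_le graph visited v)
    rcases Nat.lt_or_ge (pvUnvis graph r1.val) (pvUnvis graph visited) with hlt | hge
    · exact Prod.Lex.left _ _ hlt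
    · have : pvUnvis graph r1.val = pvUnvis graph visited := Nat.le_antisymm h1 hge
      rw [this]
      apply Prod.Lex.right
      simp
  · apply Prod.Lex.right
    simp

def goB' (graph : List (String × List (String × List String)))
    (s : PySem.Set String) (l : List String) : List String := (dfsGo graph s l).val

theorem goB'_nil (graph : List (String × List (String × List String))) (s : PySem.Set String) :
    goB' graph s [] = s := by
  rw [goB', dfsGo]

theorem goB'_cons_new (graph : List (String × List (String × List String)))
    (s : PySem.Set String) (v : String) (rest : List String)
    (h : PySem.Set.contains s v = false) :
    goB' graph s (v :: rest) =
      goB' graph (goB' graph (PySem.Set.add s v) (pvAnc graph v).reverse) rest := by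
  have hm : v ∉ s := pvContains_false_not_mem s v h
  rw [goB', dfsGo]
  simp [hm, goB']

theorem goB'_cons_mem (graph : List (String × List (String × List String)))
    (s : PySem.Set String) (v : String) (rest : List String)
    (h : PySem.Set.contains s v = true) :
    goB' graph s (v :: rest) = goB' graph s rest := by
  have hm : v ∈ s := (PySem.Set.contains_iff _ _).mp h
  rw [goB', dfsGo]
  simp [hm, goB']

theorem goB'_unvis_le (graph : List (String × List (String × List String)))
    (s : PySem.Set String) (l : List String) :
    pvUnvis graph (goB' graph s l) ≤ pvUnvis graph s := (dfsGo graph s l).property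

theorem goB'_mono (graph : List (String × List (String × List String))) :
    ∀ (n : Nat) (s : PySem.Set String), pvUnvis graph s = n →
      ∀ (l : List String) (a : String), a ∈ s → a ∈ goB' graph s l := by
  intro n
  induction n using Nat.strong_induction_on with
  | _ n ihn =>
    suffices h : ∀ (l : List String) (s : PySem.Set String), pvUnvis graph s = n →
        ∀ a, a ∈ s → a ∈ goB' graph s l by
      intro s hs l a ha
      exact h l s hs a ha
    intro l
    induction l with
    | nil =>
      intro s hs a ha
      rw [goB'_nil]
      exact ha
    | cons v t iht =>
      intro s hs a ha
      cases hc : PySem.Set.contains s v with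
      | true =>
        rw [goB'_cons_mem _ _ _ _ hc]
        exact iht s hs a ha
      | false =>
        rw [goB'_cons_new _ _ _ _ hc]
        have ha' : a ∈ PySem.Set.add s v := (PySem.Set.mem_add _ _ _).mpr (Or.inl ha)
        have hstep : a ∈ goB' graph (PySem.Set.add s v) (pvAnc graph v).reverse := by
          by_cases hk : v ∈ graph.map Prod.fst
          · exact ihn _ (hs ▸ pvUnvis_add_lt graph s v hk hc) _ rfl _ _ ha'
          · rw [pvAnc_of_not_key graph v hk, List.reverse_nil, goB'_nil]
            exact ha'
        have hle : pvUnvis graph (goB' graph (PySem.Set.add s v) (pvAnc graph v).reverse) ≤ n :=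
          hs ▸ Nat.le_trans (goB'_unvis_le graph _ _) (pvUnvis_add_le graph s v)
        rcases Nat.lt_or_ge (pvUnvis graph (goB' graph (PySem.Set.add s v) (pvAnc graph v).reverse)) n with hlt | hge
        · exact ihn _ hlt _ rfl _ _ hstep
        · exact iht _ (Nat.le_antisymm hle hge) a hstep

theorem goB'_append (graph : List (String × List (String × List String))) :
    ∀ (l1 l2 : List String) (s : PySem.Set String),
      goB' graph s (l1 ++ l2) = goB' graph (goB' graph s l1) l2 := by
  intro l1
  induction l1 with
  | nil =>
    intro l2 s
    rw [List.nil_append, goB'_nil]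
  | cons v t ih =>
    intro l2 s
    cases hc : PySem.Set.contains s v with
    | true => rw [List.cons_append, goB'_cons_mem _ _ _ _ hc, goB'_cons_mem _ _ _ _ hc, ih]
    | false => rw [List.cons_append, goB'_cons_new _ _ _ _ hc, goB'_cons_new _ _ _ _ hc, ih]

theorem goB'_skipFilter (graph : List (String × List (String × List String))) :
    ∀ (l : List String) (s s₀ : PySem.Set String), (∀ a, a ∈ s₀ → a ∈ s) →
      goB' graph s (l.filter (fun a => !(PySem.Set.contains s₀ a))) = goB' graph s l := by
  intro l
  induction l with
  | nil => intro s s₀ _; rfl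
  | cons v t ih =>
    intro s s₀ hsub
    by_cases h0 : v ∈ s₀
    · have hcs : PySem.Set.contains s v = true := (PySem.Set.contains_iff _ _).mpr (hsub v h0)
      rw [List.filter_cons_of_neg (by simp; exact h0), goB'_cons_mem _ _ _ _ hcs, ih s s₀ hsub]
    · have hkeep : (!(PySem.Set.contains s₀ v)) = true := by
        cases hc0 : PySem.Set.contains s₀ v
        · rfl
        · exact absurd ((PySem.Set.contains_iff _ _).mp hc0) h0
      rw [List.filter_cons_of_pos (by simp; exact h0)]
      cases hc : PySem.Set.contains s v with
      | true =>
        rw [goB'_cons_mem _ _ _ _ hc, goB'_cons_mem _ _ _ _ hc, ih s s₀ hsub]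
      | false =>
        rw [goB'_cons_new _ _ _ _ hc, goB'_cons_new _ _ _ _ hc]
        apply ih
        intro a ha
        have h1 : a ∈ PySem.Set.add s v := (PySem.Set.mem_add _ _ _).mpr (Or.inl (hsub a ha))
        exact goB'_mono graph _ _ rfl _ _ h1

theorem pvReverse_cons (a : String) (as : List String) :
    (a :: as).reverse =
      (a :: as).getLast (List.cons_ne_nil a as) :: (a :: as).dropLast.reverse := by
  conv_lhs => rw [← List.dropLast_append_getLast (List.cons_ne_nil a as)]
  rw [List.reverse_append]
  rfl

theorem loopA_eq_goB' (graph : List (String × List (String × List String))) :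
    ∀ (visited : PySem.Set String) (stack : List String),
      dfsLoopA graph visited stack = goB' graph visited stack.reverse := by
  intro visited stack
  induction visited, stack using dfsLoopA.induct graph with
  | case1 visited =>
    rw [dfsLoopA, List.reverse_nil, goB'_nil]
  | case2 visited a as vertex stack' h visited' ih =>
    rw [dfsLoopA]
    rw [dif_pos h]
    rw [ih, pvReverse_cons, goB'_cons_new _ _ _ _ h, List.reverse_append, goB'_append]
    have hdiff : PySem.Set.diff (pvAnc graph ((a :: as).getLast (List.cons_ne_nil a as)))
        (PySem.Set.add visited ((a :: as).getLast (List.cons_ne_nil a as))) =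
        (pvAnc graph ((a :: as).getLast (List.cons_ne_nil a as))).filter
          (fun x => !(PySem.Set.contains (PySem.Set.add visited ((a :: as).getLast (List.cons_ne_nil a as))) x)) := by
      simp [PySem.Set.diff]
    rw [hdiff, ← List.filter_reverse, goB'_skipFilter graph _ _ _ (fun a ha => ha)]
  | case3 visited a as vertex stack' h ih =>
    rw [dfsLoopA]
    rw [dif_neg h]
    have hc : PySem.Set.contains visited ((a :: as).getLast (List.cons_ne_nil a as)) = true := by
      cases hcv : PySem.Set.contains visited ((a :: as).getLast (List.cons_ne_nil a as))
      · exact absurd hcv h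
      · rfl
    rw [ih, pvReverse_cons, goB'_cons_mem _ _ _ _ hc]

-- Fuel sufficiency for B's port: with pvUnvis graph s ≤ n, fuel n+1 runs B's recursion
-- to completion and a left fold of it computes goB'.
theorem visitB_fold_eq_goB' (graph : List (String × List (String × List String))) :
    ∀ (n : Nat) (s : PySem.Set String), pvUnvis graph s ≤ n →
      ∀ (l : List String), l.foldl (visitB graph (n + 1)) s = goB' graph s l := by
  intro n
  induction n using Nat.strong_induction_on with
  | _ n ihn =>
    intro s hs l
    induction l generalizing s with
    | nil => rw [List.foldl_nil, goB'_nil]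
    | cons v t iht =>
      rw [List.foldl_cons]
      cases hc : PySem.Set.contains s v with
      | true =>
        have h1 : visitB graph (n + 1) s v = s := by
          rw [visitB, if_pos hc]
        rw [h1, goB'_cons_mem _ _ _ _ hc, iht s hs]
      | false =>
        have h1 : visitB graph (n + 1) s v =
            ((ancB graph v).reverse).foldl (visitB graph n) (PySem.Set.add s v) := by
          rw [visitB, if_neg (by rw [hc]; exact Bool.false_ne_true)]
        rw [h1, ancB_eq_pvAnc, goB'_cons_new _ _ _ _ hc]
        by_cases hk : v ∈ graph.map Prod.fst
        · -- v is a key: the measure strictly drops, so fuel n = (n-1)+1 suffices inside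
          have hlt : pvUnvis graph (PySem.Set.add s v) < pvUnvis graph s :=
            pvUnvis_add_lt graph s v hk hc
          have hn1 : 1 ≤ n := by omega
          have hrw : n = (n - 1) + 1 := by omega
          have hinner : ((pvAnc graph v).reverse).foldl (visitB graph n) (PySem.Set.add s v) =
              goB' graph (PySem.Set.add s v) (pvAnc graph v).reverse := by
            rw [hrw]
            exact ihn (n - 1) (by omega) (PySem.Set.add s v) (by omega) _
          rw [hinner]
          exact iht _ (Nat.le_trans (goB'_unvis_le graph _ _)
            (Nat.le_trans (Nat.le_of_lt hlt) hs))
        · -- v is not a key: no ancestors, nothing recursed into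
          rw [pvAnc_of_not_key graph v hk, List.reverse_nil, List.foldl_nil, goB'_nil]
          exact iht _ (by rw [pvUnvis_add_eq graph s v hk]; exact hs)

theorem dfs_alt_eq_goB' (graph : List (String × List (String × List String))) (start : String) :
    dfs_alt graph start = goB' graph PySem.Set.empty [start] := by
  have hb : pvUnvis graph PySem.Set.empty ≤ graph.length := by
    unfold pvUnvis
    calc ((graph.map Prod.fst).filter _).length
        ≤ (graph.map Prod.fst).length := List.length_filter_le _ _
      _ = graph.length := List.length_map _
  have := visitB_fold_eq_goB' graph graph.length PySem.Set.empty hb [start]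
  rw [List.foldl_cons, List.foldl_nil] at this
  rw [dfs_alt, this]

-- ===== VERDICT (by name: the statement is the Claim_ definition above) =====
theorem dfs_spec : Claim_equal_dfs := by
  intro graph start _ _
  unfold Spec_dfs dfs
  rw [loopA_eq_goB' graph PySem.Set.empty [start], dfs_alt_eq_goB']
  rfl
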